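-- pv_equiv track=rewrite | github.com/district-solutions/open-agent-tools-coder | oats/cli/tui/tui_utils.py | _format_tool_args
-- ===== SOURCE A (Python) =====
-- def _format_tool_args(tool_name: str, args: dict) -> str:
--     """Format tool arguments for concise display."""
--     if tool_name == "read":
--         return args.get("file_path", str(args))[:80]
--     elif tool_name == "write":
--         fp = args.get("file_path", "?")
--         content_len = len(args.get("content", ""))
--         return f"{fp} ({content_len} chars)"
--     elif tool_name in ("edit", "multiedit"):
--         fp = args.get("file_path", "?")
--         return fp
--     elif tool_name == "bash":
--         cmd = args.get("command", str(args))[:80]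
--         return cmd
--     elif tool_name == "glob":
--         return args.get("pattern", str(args))[:80]
--     elif tool_name == "grep":
--         pat = args.get("pattern", "?")
--         path = args.get("path", ".")
--         return f"{pat} in {path}"[:80]
--     elif tool_name == "tool_search":
--         return args.get("query", str(args))[:80]
--     elif tool_name == "lsp":
--         action = args.get("action", "?")
--         return action[:80]
--     elif tool_name in ("agent", "agent_status"):
--         desc = args.get("description", args.get("prompt", str(args)))[:60]
--         return desc
--     elif tool_name in ("plan_enter", "plan_exit"):
--         return args.get("reason", "")[:60]
--     elif tool_name in ("memory_write", "memory_read", "memory_delete"):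
--         key = args.get("key", args.get("name", ""))[:40]
--         return key
--     elif tool_name in ("webfetch", "websearch"):
--         return args.get("url", args.get("query", str(args)))[:80]
--     else:
--         # Generic: show first string value
--         for v in args.values():
--             if isinstance(v, str) and v:
--                 return v[:60]
--         return str(args)[:60]
-- ===== SOURCE B (Python) =====
-- # B: each tool's display format is DATA - a mini-template string - parsed into
-- # tokens and rendered by one generic engine, instead of A's 13-branch if/elif chain.
-- # Template syntax: "{k1|k2|default}" tries keys in order (first present wins);
-- # default "!r" means str(args); "{#key}" inserts len(args.get(key, "")).
-- # The second tuple slot is the truncation limit (None = no slice).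
--
-- _TEMPLATES = {
--     "read": ("{file_path|!r}", 80),
--     "write": ("{file_path|?} ({#content} chars)", None),
--     "edit": ("{file_path|?}", None),
--     "multiedit": ("{file_path|?}", None),
--     "bash": ("{command|!r}", 80),
--     "glob": ("{pattern|!r}", 80),
--     "grep": ("{pattern|?} in {path|.}", 80),
--     "tool_search": ("{query|!r}", 80),
--     "lsp": ("{action|?}", 80),
--     "agent": ("{description|prompt|!r}", 60),
--     "agent_status": ("{description|prompt|!r}", 60),
--     "plan_enter": ("{reason|}", 60),
--     "plan_exit": ("{reason|}", 60),
--     "memory_write": ("{key|name|}", 40),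
--     "memory_read": ("{key|name|}", 40),
--     "memory_delete": ("{key|name|}", 40),
--     "webfetch": ("{url|query|!r}", 80),
--     "websearch": ("{url|query|!r}", 80),
-- }
--
--
-- def _parse(template):
--     """Parse a template into ('text', s) | ('len', key) | ('hole', keys, default) tokens."""
--     toks = []
--     i = 0
--     while i < len(template):
--         if template[i] == "{":
--             j = template.index("}", i)
--             spec = template[i + 1:j]
--             if spec.startswith("#"):
--                 toks.append(("len", spec[1:]))
--             else:
--                 *keys, default = spec.split("|")
--                 toks.append(("hole", keys, default))
--             i = j + 1
--         else:
--             j = template.find("{", i)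
--             if j == -1:
--                 j = len(template)
--             toks.append(("text", template[i:j]))
--             i = j
--     return toks
--
--
-- def _render(toks, args):
--     out = []
--     for t in toks:
--         if t[0] == "text":
--             out.append(t[1])
--         elif t[0] == "len":
--             out.append(str(len(args.get(t[1], ""))))
--         else:
--             _, keys, default = t
--             for k in keys:
--                 if k in args:
--                     out.append(args[k])
--                     break
--             else:
--                 out.append(str(args) if default == "!r" else default)
--     return "".join(out)
--
--
-- def _format_tool_args(tool_name: str, args: dict) -> str:
--     entry = _TEMPLATES.get(tool_name)
--     if entry is None:
--         # Generic: show first non-empty string value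
--         return next((v[:60] for v in args.values() if isinstance(v, str) and v),
--                     str(args)[:60])
--     template, limit = entry
--     s = _render(_parse(template), args)
--     return s if limit is None else s[:limit]
-- ===== Notes on version B (the rewrite author's own statement) =====
-- stated objective: alternative
-- what changed: Each tool's display format becomes data: a mini-template string per tool ('{key1|key2|default}' holes, '{#key}' length, '!r' = str(args)) parsed into tokens and rendered by one generic engine, replacing A's 13-branch if/elif chain of hand-written formatting code; the generic first-non-empty-string fallback is kept for unknown tools.
import Mathlib
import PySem

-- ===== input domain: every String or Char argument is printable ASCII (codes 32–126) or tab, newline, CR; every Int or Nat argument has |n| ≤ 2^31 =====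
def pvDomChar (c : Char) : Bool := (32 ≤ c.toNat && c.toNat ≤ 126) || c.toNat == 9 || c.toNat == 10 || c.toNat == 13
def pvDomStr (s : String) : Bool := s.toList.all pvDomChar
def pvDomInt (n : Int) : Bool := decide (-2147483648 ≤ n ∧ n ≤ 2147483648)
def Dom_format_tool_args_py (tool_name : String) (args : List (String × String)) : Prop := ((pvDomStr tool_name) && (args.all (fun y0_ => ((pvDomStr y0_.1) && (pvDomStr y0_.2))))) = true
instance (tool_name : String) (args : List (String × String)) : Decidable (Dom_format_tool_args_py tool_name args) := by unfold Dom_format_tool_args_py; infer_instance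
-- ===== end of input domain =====

-- B turns A's 13-branch if/elif chain into data: a per-tool mini-template string,
-- parsed into tokens and rendered by one generic engine (objective: alternative; no speed claim).

-- ===== PORT A =====
-- Shared hand-written port of Python's str(args) / repr for dict[str, str]:
-- quote choice ('"' iff the string contains ' and no "), escapes \\, the quote
-- char, \t, \n, \r — exact on the printable-ASCII + tab/newline/CR domain,
-- where no other character needs escaping.
def pyReprEsc (q : Char) (c : Char) : List Char :=
  if c == '\\' then ['\\', '\\']
  else if c == q then ['\\', q]
  else if c == '\t' then ['\\', 't']
  else if c == '\n' then ['\\', 'n']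
  else if c == '\r' then ['\\', 'r']
  else [c]

def pyReprStr (s : String) : String :=
  let cs := s.toList
  let q : Char := if cs.contains '\'' && !(cs.contains '"') then '"' else '\''
  String.ofList (q :: (cs.flatMap (pyReprEsc q) ++ [q]))

def pyStrOfDict (d : PySem.Dict String String) : String :=
  "{" ++ String.intercalate ", "
    (d.items.map (fun p => pyReprStr p.1 ++ ": " ++ pyReprStr p.2)) ++ "}"

-- s[:n] for a nonnegative literal n (exact: Python's upper-bound-only slice clamps)
def pyTake (n : Nat) (s : String) : String := String.ofList (s.toList.take n)

def format_tool_args_py (tool_name : String) (args : List (String × String)) : String :=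
  let a := PySem.Dict.ofList args
  if tool_name == "read" then pyTake 80 (a.getD "file_path" (pyStrOfDict a))
  else if tool_name == "write" then
    let fp := a.getD "file_path" "?"
    let contentLen := (a.getD "content" "").toList.length
    fp ++ " (" ++ PySem.Int.toStr (Int.ofNat contentLen) ++ " chars)"
  else if tool_name == "edit" || tool_name == "multiedit" then a.getD "file_path" "?"
  else if tool_name == "bash" then pyTake 80 (a.getD "command" (pyStrOfDict a))
  else if tool_name == "glob" then pyTake 80 (a.getD "pattern" (pyStrOfDict a))
  else if tool_name == "grep" then pyTake 80 (a.getD "pattern" "?" ++ " in " ++ a.getD "path" ".")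
  else if tool_name == "tool_search" then pyTake 80 (a.getD "query" (pyStrOfDict a))
  else if tool_name == "lsp" then pyTake 80 (a.getD "action" "?")
  else if tool_name == "agent" || tool_name == "agent_status" then
    pyTake 60 (a.getD "description" (a.getD "prompt" (pyStrOfDict a)))
  else if tool_name == "plan_enter" || tool_name == "plan_exit" then pyTake 60 (a.getD "reason" "")
  else if tool_name == "memory_write" || tool_name == "memory_read" || tool_name == "memory_delete" then
    pyTake 40 (a.getD "key" (a.getD "name" ""))
  else if tool_name == "webfetch" || tool_name == "websearch" then
    pyTake 80 (a.getD "url" (a.getD "query" (pyStrOfDict a)))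
  else
    -- for v in args.values(): if isinstance(v, str) and v: return v[:60]
    match a.values.find? (fun v => !(v == "")) with
    | some v => pyTake 60 v
    | none => pyTake 60 (pyStrOfDict a)

-- ===== PORT B =====
-- tokens of the mini-template language: ("text", s) | ("len", key) | ("hole", keys, default)
inductive PvTok where
  | text (s : String)
  | len (k : String)
  | hole (keys : List String) (dflt : String)
deriving DecidableEq, Repr

-- _parse: the while loop over the template becomes recursion on the remaining chars;
-- fuel = number of chars left bounds the recursion (each step consumes ≥ 1 char)
def pvParse (fuel : Nat) (cs : List Char) : List PvTok :=
  match fuel, cs with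
  | 0, _ => []
  | _, [] => []
  | Nat.succ f, c :: rest =>
    if c = '{' then
      let spec := rest.takeWhile (· ≠ '}')
      let tok :=
        if spec.head? == some '#' then PvTok.len (String.ofList (spec.drop 1))
        else
          let parts := spec.splitOn '|'
          PvTok.hole (parts.dropLast.map String.ofList) (String.ofList (parts.getLast?.getD []))
      tok :: pvParse f (rest.drop (spec.length + 1))
    else
      let txt := (c :: rest).takeWhile (· ≠ '{')
      PvTok.text (String.ofList txt) :: pvParse f ((c :: rest).drop txt.length)

-- _render: fold over the token list; a hole tries its keys in order (first present wins)
def pvRenderTok (a : PySem.Dict String String) : List PvTok → String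
  | [] => ""
  | PvTok.text s :: ts => s ++ pvRenderTok a ts
  | PvTok.len k :: ts => PySem.Int.toStr (Int.ofNat (a.getD k "").toList.length) ++ pvRenderTok a ts
  | PvTok.hole keys dflt :: ts =>
      ((keys.findSome? (fun k => a.get? k)).getD
        (if dflt == "!r" then pyStrOfDict a else dflt)) ++ pvRenderTok a ts

-- _TEMPLATES: tool name → (template, truncation limit)
def pvTemplates : List (String × String × Option Nat) :=
  [ ("read", "{file_path|!r}", some 80)
  , ("write", "{file_path|?} ({#content} chars)", none)
  , ("edit", "{file_path|?}", none)
  , ("multiedit", "{file_path|?}", none)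
  , ("bash", "{command|!r}", some 80)
  , ("glob", "{pattern|!r}", some 80)
  , ("grep", "{pattern|?} in {path|.}", some 80)
  , ("tool_search", "{query|!r}", some 80)
  , ("lsp", "{action|?}", some 80)
  , ("agent", "{description|prompt|!r}", some 60)
  , ("agent_status", "{description|prompt|!r}", some 60)
  , ("plan_enter", "{reason|}", some 60)
  , ("plan_exit", "{reason|}", some 60)
  , ("memory_write", "{key|name|}", some 40)
  , ("memory_read", "{key|name|}", some 40)
  , ("memory_delete", "{key|name|}", some 40)
  , ("webfetch", "{url|query|!r}", some 80)
  , ("websearch", "{url|query|!r}", some 80) ]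

-- _TEMPLATES.get(tool_name): first-match lookup in the table
def pvTplGet (key : String) : List (String × String × Option Nat) → Option (String × Option Nat)
  | [] => none
  | (n, t) :: rest => if key == n then some t else pvTplGet key rest

def format_tool_args_py_alt (tool_name : String) (args : List (String × String)) : String :=
  let a := PySem.Dict.ofList args
  match pvTplGet tool_name pvTemplates with
  | none =>
    -- generic: first non-empty string value, else str(args)[:60]
    match a.values.find? (fun v => !(v == "")) with
    | some v => pyTake 60 v
    | none => pyTake 60 (pyStrOfDict a)
  | some (tpl, limit) =>
    let s := pvRenderTok a (pvParse tpl.toList.length tpl.toList)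
    match limit with
    | none => s
    | some n => pyTake n s

-- ===== PRECONDITION & SPEC =====
def Spec_format_tool_args_py (tool_name : String) (args : List (String × String)) (out : String) : Prop := out = format_tool_args_py_alt tool_name args
instance (tool_name : String) (args : List (String × String)) (out : String) : Decidable (Spec_format_tool_args_py tool_name args out) := by unfold Spec_format_tool_args_py; infer_instance

-- ===== CLAIM (what is proved, stated in full; the proofs are below) =====
def Claim_equal_format_tool_args_py : Prop := ∀ (tool_name : String) (args : List (String × String)), Dom_format_tool_args_py tool_name args → Spec_format_tool_args_py tool_name args (format_tool_args_py tool_name args)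

-- ===== LEMMAS AND PROOFS =====

-- ===== VERDICT (by name: the statement is the Claim_ definition above) =====
theorem format_tool_args_py_spec : Claim_equal_format_tool_args_py := by
  intro tool_name args _
  unfold Spec_format_tool_args_py
  rcases eq_or_ne tool_name "read" with rfl | h1
  · have hA : format_tool_args_py "read" args = pyTake 80 ((PySem.Dict.ofList args).getD "file_path" (pyStrOfDict (PySem.Dict.ofList args))) := rfl
    have hB : format_tool_args_py_alt "read" args = pyTake 80 (pvRenderTok (PySem.Dict.ofList args) [PvTok.hole ["file_path"] "!r"]) := rfl
    rw [hA, hB]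
    simp only [pvRenderTok, List.findSome?, PySem.Dict.getD]
    cases (PySem.Dict.ofList args).get? "file_path" <;> simp [Option.getD]
  rcases eq_or_ne tool_name "write" with rfl | h2
  · have hA : format_tool_args_py "write" args = (PySem.Dict.ofList args).getD "file_path" "?" ++ " (" ++ PySem.Int.toStr (Int.ofNat ((PySem.Dict.ofList args).getD "content" "").toList.length) ++ " chars)" := rfl
    have hB : format_tool_args_py_alt "write" args = pvRenderTok (PySem.Dict.ofList args) [PvTok.hole ["file_path"] "?", PvTok.text " (", PvTok.len "content", PvTok.text " chars)"] := rfl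
    rw [hA, hB]
    simp only [pvRenderTok, List.findSome?, PySem.Dict.getD]
    cases (PySem.Dict.ofList args).get? "file_path" <;> apply String.toList_inj.mp <;>
      simp [String.toList_append, Option.getD]
  rcases eq_or_ne tool_name "edit" with rfl | h3
  · have hA : format_tool_args_py "edit" args = (PySem.Dict.ofList args).getD "file_path" "?" := rfl
    have hB : format_tool_args_py_alt "edit" args = pvRenderTok (PySem.Dict.ofList args) [PvTok.hole ["file_path"] "?"] := rfl
    rw [hA, hB]
    simp only [pvRenderTok, List.findSome?, PySem.Dict.getD]
    cases (PySem.Dict.ofList args).get? "file_path" <;> simp [Option.getD]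
  rcases eq_or_ne tool_name "multiedit" with rfl | h4
  · have hA : format_tool_args_py "multiedit" args = (PySem.Dict.ofList args).getD "file_path" "?" := rfl
    have hB : format_tool_args_py_alt "multiedit" args = pvRenderTok (PySem.Dict.ofList args) [PvTok.hole ["file_path"] "?"] := rfl
    rw [hA, hB]
    simp only [pvRenderTok, List.findSome?, PySem.Dict.getD]
    cases (PySem.Dict.ofList args).get? "file_path" <;> simp [Option.getD]
  rcases eq_or_ne tool_name "bash" with rfl | h5
  · have hA : format_tool_args_py "bash" args = pyTake 80 ((PySem.Dict.ofList args).getD "command" (pyStrOfDict (PySem.Dict.ofList args))) := rfl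
    have hB : format_tool_args_py_alt "bash" args = pyTake 80 (pvRenderTok (PySem.Dict.ofList args) [PvTok.hole ["command"] "!r"]) := rfl
    rw [hA, hB]
    simp only [pvRenderTok, List.findSome?, PySem.Dict.getD]
    cases (PySem.Dict.ofList args).get? "command" <;> simp [Option.getD]
  rcases eq_or_ne tool_name "glob" with rfl | h6
  · have hA : format_tool_args_py "glob" args = pyTake 80 ((PySem.Dict.ofList args).getD "pattern" (pyStrOfDict (PySem.Dict.ofList args))) := rfl
    have hB : format_tool_args_py_alt "glob" args = pyTake 80 (pvRenderTok (PySem.Dict.ofList args) [PvTok.hole ["pattern"] "!r"]) := rfl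
    rw [hA, hB]
    simp only [pvRenderTok, List.findSome?, PySem.Dict.getD]
    cases (PySem.Dict.ofList args).get? "pattern" <;> simp [Option.getD]
  rcases eq_or_ne tool_name "grep" with rfl | h7
  · have hA : format_tool_args_py "grep" args = pyTake 80 ((PySem.Dict.ofList args).getD "pattern" "?" ++ " in " ++ (PySem.Dict.ofList args).getD "path" ".") := rfl
    have hB : format_tool_args_py_alt "grep" args = pyTake 80 (pvRenderTok (PySem.Dict.ofList args) [PvTok.hole ["pattern"] "?", PvTok.text " in ", PvTok.hole ["path"] "."]) := rfl
    rw [hA, hB]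
    simp only [pvRenderTok, List.findSome?, PySem.Dict.getD]
    congr 1
    cases (PySem.Dict.ofList args).get? "pattern" <;> cases (PySem.Dict.ofList args).get? "path" <;>
      apply String.toList_inj.mp <;> simp [String.toList_append, Option.getD]
  rcases eq_or_ne tool_name "tool_search" with rfl | h8
  · have hA : format_tool_args_py "tool_search" args = pyTake 80 ((PySem.Dict.ofList args).getD "query" (pyStrOfDict (PySem.Dict.ofList args))) := rfl
    have hB : format_tool_args_py_alt "tool_search" args = pyTake 80 (pvRenderTok (PySem.Dict.ofList args) [PvTok.hole ["query"] "!r"]) := rfl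
    rw [hA, hB]
    simp only [pvRenderTok, List.findSome?, PySem.Dict.getD]
    cases (PySem.Dict.ofList args).get? "query" <;> simp [Option.getD]
  rcases eq_or_ne tool_name "lsp" with rfl | h9
  · have hA : format_tool_args_py "lsp" args = pyTake 80 ((PySem.Dict.ofList args).getD "action" "?") := rfl
    have hB : format_tool_args_py_alt "lsp" args = pyTake 80 (pvRenderTok (PySem.Dict.ofList args) [PvTok.hole ["action"] "?"]) := rfl
    rw [hA, hB]
    simp only [pvRenderTok, List.findSome?, PySem.Dict.getD]
    cases (PySem.Dict.ofList args).get? "action" <;> simp [Option.getD]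
  rcases eq_or_ne tool_name "agent" with rfl | h10
  · have hA : format_tool_args_py "agent" args = pyTake 60 ((PySem.Dict.ofList args).getD "description" ((PySem.Dict.ofList args).getD "prompt" (pyStrOfDict (PySem.Dict.ofList args)))) := rfl
    have hB : format_tool_args_py_alt "agent" args = pyTake 60 (pvRenderTok (PySem.Dict.ofList args) [PvTok.hole ["description", "prompt"] "!r"]) := rfl
    rw [hA, hB]
    simp only [pvRenderTok, List.findSome?, PySem.Dict.getD]
    cases (PySem.Dict.ofList args).get? "description" <;> cases (PySem.Dict.ofList args).get? "prompt" <;> simp [Option.getD]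
  rcases eq_or_ne tool_name "agent_status" with rfl | h11
  · have hA : format_tool_args_py "agent_status" args = pyTake 60 ((PySem.Dict.ofList args).getD "description" ((PySem.Dict.ofList args).getD "prompt" (pyStrOfDict (PySem.Dict.ofList args)))) := rfl
    have hB : format_tool_args_py_alt "agent_status" args = pyTake 60 (pvRenderTok (PySem.Dict.ofList args) [PvTok.hole ["description", "prompt"] "!r"]) := rfl
    rw [hA, hB]
    simp only [pvRenderTok, List.findSome?, PySem.Dict.getD]
    cases (PySem.Dict.ofList args).get? "description" <;> cases (PySem.Dict.ofList args).get? "prompt" <;> simp [Option.getD]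
  rcases eq_or_ne tool_name "plan_enter" with rfl | h12
  · have hA : format_tool_args_py "plan_enter" args = pyTake 60 ((PySem.Dict.ofList args).getD "reason" "") := rfl
    have hB : format_tool_args_py_alt "plan_enter" args = pyTake 60 (pvRenderTok (PySem.Dict.ofList args) [PvTok.hole ["reason"] ""]) := rfl
    rw [hA, hB]
    simp only [pvRenderTok, List.findSome?, PySem.Dict.getD]
    cases (PySem.Dict.ofList args).get? "reason" <;> simp [Option.getD]
  rcases eq_or_ne tool_name "plan_exit" with rfl | h13
  · have hA : format_tool_args_py "plan_exit" args = pyTake 60 ((PySem.Dict.ofList args).getD "reason" "") := rfl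
    have hB : format_tool_args_py_alt "plan_exit" args = pyTake 60 (pvRenderTok (PySem.Dict.ofList args) [PvTok.hole ["reason"] ""]) := rfl
    rw [hA, hB]
    simp only [pvRenderTok, List.findSome?, PySem.Dict.getD]
    cases (PySem.Dict.ofList args).get? "reason" <;> simp [Option.getD]
  rcases eq_or_ne tool_name "memory_write" with rfl | h14
  · have hA : format_tool_args_py "memory_write" args = pyTake 40 ((PySem.Dict.ofList args).getD "key" ((PySem.Dict.ofList args).getD "name" "")) := rfl
    have hB : format_tool_args_py_alt "memory_write" args = pyTake 40 (pvRenderTok (PySem.Dict.ofList args) [PvTok.hole ["key", "name"] ""]) := rfl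
    rw [hA, hB]
    simp only [pvRenderTok, List.findSome?, PySem.Dict.getD]
    cases (PySem.Dict.ofList args).get? "key" <;> cases (PySem.Dict.ofList args).get? "name" <;> simp [Option.getD]
  rcases eq_or_ne tool_name "memory_read" with rfl | h15
  · have hA : format_tool_args_py "memory_read" args = pyTake 40 ((PySem.Dict.ofList args).getD "key" ((PySem.Dict.ofList args).getD "name" "")) := rfl
    have hB : format_tool_args_py_alt "memory_read" args = pyTake 40 (pvRenderTok (PySem.Dict.ofList args) [PvTok.hole ["key", "name"] ""]) := rfl
    rw [hA, hB]
    simp only [pvRenderTok, List.findSome?, PySem.Dict.getD]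
    cases (PySem.Dict.ofList args).get? "key" <;> cases (PySem.Dict.ofList args).get? "name" <;> simp [Option.getD]
  rcases eq_or_ne tool_name "memory_delete" with rfl | h16
  · have hA : format_tool_args_py "memory_delete" args = pyTake 40 ((PySem.Dict.ofList args).getD "key" ((PySem.Dict.ofList args).getD "name" "")) := rfl
    have hB : format_tool_args_py_alt "memory_delete" args = pyTake 40 (pvRenderTok (PySem.Dict.ofList args) [PvTok.hole ["key", "name"] ""]) := rfl
    rw [hA, hB]
    simp only [pvRenderTok, List.findSome?, PySem.Dict.getD]
    cases (PySem.Dict.ofList args).get? "key" <;> cases (PySem.Dict.ofList args).get? "name" <;> simp [Option.getD]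
  rcases eq_or_ne tool_name "webfetch" with rfl | h17
  · have hA : format_tool_args_py "webfetch" args = pyTake 80 ((PySem.Dict.ofList args).getD "url" ((PySem.Dict.ofList args).getD "query" (pyStrOfDict (PySem.Dict.ofList args)))) := rfl
    have hB : format_tool_args_py_alt "webfetch" args = pyTake 80 (pvRenderTok (PySem.Dict.ofList args) [PvTok.hole ["url", "query"] "!r"]) := rfl
    rw [hA, hB]
    simp only [pvRenderTok, List.findSome?, PySem.Dict.getD]
    cases (PySem.Dict.ofList args).get? "url" <;> cases (PySem.Dict.ofList args).get? "query" <;> simp [Option.getD]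
  rcases eq_or_ne tool_name "websearch" with rfl | h18
  · have hA : format_tool_args_py "websearch" args = pyTake 80 ((PySem.Dict.ofList args).getD "url" ((PySem.Dict.ofList args).getD "query" (pyStrOfDict (PySem.Dict.ofList args)))) := rfl
    have hB : format_tool_args_py_alt "websearch" args = pyTake 80 (pvRenderTok (PySem.Dict.ofList args) [PvTok.hole ["url", "query"] "!r"]) := rfl
    rw [hA, hB]
    simp only [pvRenderTok, List.findSome?, PySem.Dict.getD]
    cases (PySem.Dict.ofList args).get? "url" <;> cases (PySem.Dict.ofList args).get? "query" <;> simp [Option.getD]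
  simp [format_tool_args_py, format_tool_args_py_alt, pvTplGet, pvTemplates, h1, h2, h3, h4, h5, h6, h7, h8, h9, h10, h11, h12, h13, h14, h15, h16, h17, h18]
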